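/- GENERATED by c/gen_decode.py: decode facts of the image, one per distinct instruction byte string. -/
import UserX.DecodeImage

#decode_all Toy.Dec
  "0fb66d00"  -- movzx ebp,BYTE PTR [rbp+0x0]
  "4881ec88000000"  -- sub rsp,0x88
  "488d3c2b"  -- lea rdi,[rbx+rbp*1]
  "49d3ec"  -- shr r12,cl
  "7f0a"  -- jg 105195
  "be03000000"  -- mov esi,0x3
  "e86b020000"  -- call 105320
  "eb22"  -- jmp 105357
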